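-- pv_equiv track=rewrite | github.com/hhhtzh/Proct511111 | keplar/preoperator/MTaylor/split_formula.py | split_formula
-- ===== SOURCE A (Python) =====
-- def split_formula(formula):
--     # Remove spaces from the formula
--     formula = formula.replace(" ", "")
--     formula = "+" + formula.strip()
--
--     terms = []
--     term = ""
--     operator = "+"
--
--     # Split the formula into individual terms
--     for i in range(len(formula)):
--         char = formula[i]
--         if char == "+" or char == "-":
--             if term != "":
--                 terms.append(operator + term)
--             term = ""
--             operator = char
--         else:
--             term += char
--
--     if term != "":
--         terms.append(operator + term)
--
--     return terms
-- ===== SOURCE B (Python) =====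
-- def split_formula(formula):
--     # two-pointer scan over operator positions, slicing out each signed term
--     s = "+" + formula.replace(" ", "").strip()
--     terms = []
--     i = 0
--     n = len(s)
--     while i < n:
--         j = i + 1
--         while j < n and s[j] not in "+-":
--             j += 1
--         if j - i > 1:
--             terms.append(s[i:j])
--         i = j
--     return terms
-- ===== Notes on version B (the rewrite author's own statement) =====
-- stated objective: alternative
-- what changed: Replaced A's char-by-char accumulator state machine (terms/term/operator registers updated per character, plus a trailing flush) with a two-pointer scan that finds each operator-to-operator run and slices the signed term out directly.
import Mathlib
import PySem

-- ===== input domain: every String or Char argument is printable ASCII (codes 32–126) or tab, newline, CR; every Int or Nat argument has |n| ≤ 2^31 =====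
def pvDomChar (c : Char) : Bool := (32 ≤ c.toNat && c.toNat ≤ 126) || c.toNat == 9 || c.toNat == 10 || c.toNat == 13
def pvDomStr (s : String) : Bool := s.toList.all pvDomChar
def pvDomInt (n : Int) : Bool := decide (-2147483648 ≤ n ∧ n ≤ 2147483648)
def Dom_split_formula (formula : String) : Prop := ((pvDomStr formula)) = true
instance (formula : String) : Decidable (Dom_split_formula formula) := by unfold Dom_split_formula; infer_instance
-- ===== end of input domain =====

-- B replaces A's char-by-char accumulator state machine by a two-pointer scan that
-- slices out each signed term; objective: alternative (same cost), no behaviour change.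

-- ===== PORT A =====
-- one loop step of A: state = (terms, term, operator)
def aStep (st : List String × List Char × Char) (c : Char) : List String × List Char × Char :=
  if c = '+' ∨ c = '-' then
    ((if st.2.1 ≠ [] then st.1 ++ [String.ofList (st.2.2 :: st.2.1)] else st.1), [], c)
  else (st.1, st.2.1 ++ [c], st.2.2)

-- the trailing 'if term != ""' after A's loop
def aFin (st : List String × List Char × Char) : List String :=
  if st.2.1 ≠ [] then st.1 ++ [String.ofList (st.2.2 :: st.2.1)] else st.1

def split_formula (formula : String) : List String :=
  let f := PySem.Str.strip (PySem.Str.replace formula " " "")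
  aFin ((('+' :: f.toList)).foldl aStep ([], [], '+'))

-- ===== PORT B =====
-- B's inner while loop: the run of non-operator characters after position i
def pvBody (d : Char) : Bool := !(d == '+' || d == '-')

-- B's outer while loop: at each operator position slice out s[i:j]
def bChunks : List Char → List String
  | [] => []
  | c :: rest =>
    let body := rest.takeWhile pvBody
    if 0 < body.length then
      String.ofList (c :: body) :: bChunks (rest.drop body.length)
    else bChunks (rest.drop body.length)
termination_by l => l.length
decreasing_by all_goals
  simp only [List.length_cons]
  exact Nat.lt_succ_of_le (Nat.le_trans (List.length_drop ▸ Nat.sub_le _ _) (Nat.le_refl _))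

def split_formula_alt (formula : String) : List String :=
  let f := PySem.Str.strip (PySem.Str.replace formula " " "")
  bChunks ('+' :: f.toList)

-- ===== PRECONDITION & SPEC =====
def Spec_split_formula (formula : String) (out : List String) : Prop := out = split_formula_alt formula
instance (formula : String) (out : List String) : Decidable (Spec_split_formula formula out) := by unfold Spec_split_formula; infer_instance

-- ===== CLAIM (what is proved, stated in full; the proofs are below) =====
def Claim_equal_split_formula : Prop := ∀ (formula : String), Dom_split_formula formula → Spec_split_formula formula (split_formula formula)

-- ===== LEMMAS AND PROOFS =====

lemma pvBody_false_iff (c : Char) : pvBody c = false ↔ (c = '+' ∨ c = '-') := by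
  simp [pvBody]; tauto

lemma pvBody_true_iff (c : Char) : pvBody c = true ↔ ¬(c = '+' ∨ c = '-') := by
  simp [pvBody]

lemma foldl_body (body : List Char) (h : ∀ c ∈ body, pvBody c = true) :
    ∀ (rest : List Char) (terms : List String) (term : List Char) (op : Char),
    (body ++ rest).foldl aStep (terms, term, op) = rest.foldl aStep (terms, term ++ body, op) := by
  induction body with
  | nil => intro rest terms term op; simp
  | cons c body ih =>
    intro rest terms term op
    have hc : ¬(c = '+' ∨ c = '-') := (pvBody_true_iff c).mp (h c (by simp))
    have := ih (fun d hd => h d (by simp [hd])) rest terms (term ++ [c]) op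
    simpa [aStep, hc] using this

lemma drop_takeWhile (p : Char → Bool) (l : List Char) :
    l.drop (l.takeWhile p).length = l.dropWhile p := by
  induction l with
  | nil => simp
  | cons c rest ih =>
    by_cases hc : p c = true
    · simpa [hc] using ih
    · simp [hc]

lemma dropWhile_head_false (p : Char → Bool) (l : List Char) (d : Char) (t : List Char)
    (h : l.dropWhile p = d :: t) : p d = false := by
  induction l with
  | nil => simp at h
  | cons c rest ih =>
    by_cases hc : p c = true
    · exact ih (by simpa [List.dropWhile_cons, hc] using h)
    · rw [List.dropWhile_cons_of_neg hc] at h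
      cases h; simpa using hc

lemma main_lemma : ∀ (n : ℕ) (l : List Char), l.length ≤ n →
    ∀ (terms : List String) (op : Char),
    aFin (l.foldl aStep (terms, [], op)) = terms ++ bChunks (op :: l) := by
  intro n
  induction n with
  | zero =>
    intro l hl terms op
    have : l = [] := List.length_eq_zero_iff.mp (Nat.le_zero.mp hl)
    subst this
    simp [aFin, bChunks]
  | succ n ih =>
    intro l hl terms op
    cases l with
    | nil => simp [aFin, bChunks]
    | cons c rest =>
      by_cases hc : c = '+' ∨ c = '-'
      · -- operator char: current (empty) term dropped, operator becomes c
        have hb : pvBody c = false := (pvBody_false_iff c).mpr hc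
        have h1 : ((c :: rest).foldl aStep (terms, [], op)) = rest.foldl aStep (terms, [], c) := by
          simp [aStep, hc]
        rw [h1, ih rest (by simpa using Nat.lt_succ_iff.mp (by simpa using hl)) terms c]
        conv_rhs => rw [bChunks]
        simp [hb]
      · -- term char: absorb the whole non-operator run
        have hb : pvBody c = true := (pvBody_true_iff c).mpr hc
        have hsplit : rest.takeWhile pvBody ++ rest.dropWhile pvBody = rest :=
          List.takeWhile_append_dropWhile
        have hmem : ∀ d ∈ rest.takeWhile pvBody, pvBody d = true := by
          intro d hd; exact List.mem_takeWhile_imp hd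
        have h1 : ((c :: rest).foldl aStep (terms, [], op)) =
            (rest.dropWhile pvBody).foldl aStep (terms, c :: rest.takeWhile pvBody, op) := by
          have : (c :: rest) = (c :: rest.takeWhile pvBody) ++ rest.dropWhile pvBody := by
            simp [hsplit]
          rw [this]
          have := foldl_body (c :: rest.takeWhile pvBody)
            (by intro d hd; rcases List.mem_cons.mp hd with h | h
                · subst h; exact hb
                · exact hmem d h)
            (rest.dropWhile pvBody) terms [] op
          simpa using this
        have hBrhs : bChunks (op :: c :: rest) =
            String.ofList (op :: c :: rest.takeWhile pvBody) :: bChunks (rest.dropWhile pvBody) := by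
          conv_lhs => rw [bChunks]
          simp [hb, drop_takeWhile]
        rw [h1, hBrhs]
        cases hdw : rest.dropWhile pvBody with
        | nil =>
          simp [aFin, bChunks]
        | cons d rest2 =>
          clear hsplit
          have hd : pvBody d = false := dropWhile_head_false pvBody rest d rest2 hdw
          have hdop : d = '+' ∨ d = '-' := (pvBody_false_iff d).mp hd
          have hlen2 : rest2.length ≤ n := by
            have h1 : (rest.dropWhile pvBody).length ≤ rest.length :=
              List.length_dropWhile_le _ _
            have h2 : rest.length ≤ n := Nat.lt_succ_iff.mp (by simpa using hl)
            rw [hdw] at h1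
            simp at h1
            omega
          have h2 : ((d :: rest2).foldl aStep (terms, c :: rest.takeWhile pvBody, op)) =
              rest2.foldl aStep (terms ++ [String.ofList (op :: c :: rest.takeWhile pvBody)], [], d) := by
            simp [aStep, hdop]
          rw [h2, ih rest2 hlen2 _ d]
          simp

-- ===== VERDICT (by name: the statement is the Claim_ definition above) =====
theorem split_formula_spec : Claim_equal_split_formula := by
  intro formula _
  simp only [Spec_split_formula, split_formula, split_formula_alt]
  have h0 : ∀ t : List Char, List.foldl aStep ([], [], '+') ('+' :: t) =
      List.foldl aStep ([], [], '+') t := by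
    intro t; simp [aStep]
  rw [h0]
  simpa using main_lemma _ _ (Nat.le_refl _) [] '+'
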